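-- pv_equiv track=rewrite | github.com/schmittydog/algo_expert | sort_stack.py | swap_down
-- ===== SOURCE A (Python) =====
-- def swap_down(array):
--     if len(array) == 1:
--         return array
--     val = array.pop()
--     if val < array[-1]:
--         val, array[-1] = array[-1], val
--     swap_down(array)
--     array.append(val)
--     return array
-- ===== SOURCE B (Python) =====
-- def swap_down(array):
--     if not array:
--         return array
--     carry = array[-1]
--     kept = []
--     for x in reversed(array[:-1]):
--         if carry < x:
--             kept.append(x)
--         else:
--             kept.append(carry)
--             carry = x
--     array[:] = [carry] + kept[::-1]
--     return array
-- ===== Notes on version B (the rewrite author's own statement) =====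
-- stated objective: alternative
-- what changed: Replaces the pop/recurse/append recursion by a single iterative right-to-left scan that carries the running minimum in a local variable and rebuilds the list (no recursion, no pops).
-- crash fix: On the empty list A raises IndexError (it pops before checking); B returns the empty list unchanged. — e.g. on swap_down([]): A raises IndexError, B returns []
import Mathlib
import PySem

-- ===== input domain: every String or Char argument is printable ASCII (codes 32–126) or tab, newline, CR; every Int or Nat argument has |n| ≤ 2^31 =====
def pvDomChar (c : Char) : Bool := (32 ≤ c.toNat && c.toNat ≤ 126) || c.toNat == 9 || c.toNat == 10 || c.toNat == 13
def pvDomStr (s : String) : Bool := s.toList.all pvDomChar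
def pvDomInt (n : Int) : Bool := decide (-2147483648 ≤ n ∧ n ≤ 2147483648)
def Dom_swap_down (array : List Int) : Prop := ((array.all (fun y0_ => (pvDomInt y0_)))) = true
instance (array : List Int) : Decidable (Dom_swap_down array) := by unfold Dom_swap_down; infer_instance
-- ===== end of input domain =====

-- B replaces A's pop/recurse/append recursion by one iterative right-to-left scan carrying the running minimum (alternative decomposition); both Pythons mutate the argument list in place, the equivalence proved here is about the returned contents.


-- ===== PORT A =====
-- Literal port of A's recursion: pop last, conditional swap with new last, recurse, re-append.
-- On [] Python's array.pop() raises IndexError: that input is excluded by Pre_; the port returns [].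
def swap_down : List Int → List Int
  | [] => []
  | [x] => [x]
  | x :: y :: rest =>
    let val := ((x :: y :: rest).getLast?).getD 0
    let arr := (x :: y :: rest).dropLast
    if val < (arr.getLast?).getD 0 then
      swap_down (arr.dropLast ++ [val]) ++ [(arr.getLast?).getD 0]
    else
      swap_down arr ++ [val]
termination_by a => a.length
decreasing_by all_goals simp [List.dropLast]

-- ===== PORT B =====
-- Port of B: early return on empty; carry = last element, fold B's for-loop over the
-- reversed prefix accumulating (carry, kept); result = carry :: kept reversed.
def swap_down_alt (array : List Int) : List Int :=
  if array.isEmpty then array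
  else
    let carry0 := (array.getLast?).getD 0
    let s := ((array.dropLast).reverse).foldl
      (fun (p : Int × List Int) x =>
        if p.1 < x then (p.1, p.2 ++ [x]) else (x, p.2 ++ [p.1])) (carry0, ([] : List Int))
    s.1 :: s.2.reverse

-- ===== PRECONDITION & SPEC =====
-- Pre_ excludes only the empty list, on which Python A raises IndexError (array.pop() on []).
def Pre_swap_down (array : List Int) : Prop := array ≠ []
instance (array : List Int) : Decidable (Pre_swap_down array) := by unfold Pre_swap_down; infer_instance
def pvWitness_swap_down : List Int := [3, 1, 2]

-- On the empty list A raises IndexError (it pops before checking); B returns the empty list unchanged.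
def Raises_swap_down (array : List Int) : Prop := array = []
instance (array : List Int) : Decidable (Raises_swap_down array) := by unfold Raises_swap_down; infer_instance
def pvRaiseWitness_swap_down : List Int := []
def pvRaiseWitnessOut_swap_down : List Int := []

def Spec_swap_down (array : List Int) (out : List Int) : Prop := out = swap_down_alt array
instance (array : List Int) (out : List Int) : Decidable (Spec_swap_down array out) := by unfold Spec_swap_down; infer_instance

-- ===== CLAIM (what is proved, stated in full; the proofs are below) =====
def Claim_equal_swap_down : Prop := ∀ (array : List Int), Dom_swap_down array → Pre_swap_down array → Spec_swap_down array (swap_down array)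
def Claim_raises_swap_down : Prop := (∀ (array : List Int), Dom_swap_down array → Raises_swap_down array → ¬ Pre_swap_down array) ∧ (Dom_swap_down (pvRaiseWitness_swap_down) ∧ Raises_swap_down (pvRaiseWitness_swap_down) ∧ swap_down_alt (pvRaiseWitness_swap_down) = pvRaiseWitnessOut_swap_down)

-- ===== LEMMAS AND PROOFS =====

-- Common characterisation: F v rys is the result of carrying v down through the
-- elements rys (listed right-to-left), emitting the larger at each step.
def pvF : Int → List Int → List Int
  | v, [] => [v]
  | v, x :: rys => if v < x then pvF v rys ++ [x] else pvF x rys ++ [v]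

-- B's fold computes pvF.
theorem pvFold_eq_F (rys : List Int) : ∀ (c : Int) (acc : List Int),
    (let s := rys.foldl
      (fun (p : Int × List Int) x =>
        if p.1 < x then (p.1, p.2 ++ [x]) else (x, p.2 ++ [p.1])) (c, acc)
     s.1 :: s.2.reverse) = pvF c rys ++ acc.reverse := by
  induction rys with
  | nil => intro c acc; simp [pvF]
  | cons x rys ih =>
    intro c acc
    simp only [List.foldl_cons, pvF]
    split_ifs with h <;> simp [ih]

-- Unfolding of A's port on lists of length ≥ 2, phrased via getLast?/dropLast.
theorem swap_down_two (l : List Int) (h : 2 ≤ l.length) :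
    swap_down l =
      (if (l.getLast?).getD 0 < ((l.dropLast).getLast?).getD 0 then
        swap_down ((l.dropLast).dropLast ++ [(l.getLast?).getD 0]) ++ [((l.dropLast).getLast?).getD 0]
      else
        swap_down l.dropLast ++ [(l.getLast?).getD 0]) := by
  match l with
  | [] => simp at h
  | [x] => simp at h
  | x :: y :: rest => rw [swap_down]

-- A computes pvF on the reversed prefix.
theorem swap_down_eq_F (rys : List Int) : ∀ (v : Int),
    swap_down (rys.reverse ++ [v]) = pvF v rys := by
  induction rys with
  | nil => intro v; simp [swap_down, pvF]
  | cons u rys ih =>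
    intro v
    rw [swap_down_two ((u :: rys).reverse ++ [v]) (by simp)]
    have h1 : ((u :: rys).reverse ++ [v]).dropLast = rys.reverse ++ [u] := by
      simp
    have h2 : ((u :: rys).reverse ++ [v]).getLast? = some v := List.getLast?_concat
    have h3 : (rys.reverse ++ [u]).getLast? = some u := List.getLast?_concat
    have h4 : (rys.reverse ++ [u]).dropLast = rys.reverse := List.dropLast_concat
    simp only [h1, h2, h3, h4, Option.getD_some, pvF]
    split_ifs with h <;> rw [ih]

-- ===== VERDICT (by name: the statement is the Claim_ definition above) =====
theorem swap_down_spec : Claim_equal_swap_down := by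
  intro array _ hne
  unfold Spec_swap_down swap_down_alt
  rw [if_neg (by simpa using hne)]
  have hdec : array = array.dropLast ++ [(array.getLast?).getD 0] := by
    conv_lhs => rw [← List.dropLast_concat_getLast hne]
    rw [List.getLast?_eq_getLast_of_ne_nil hne]
    simp
  have hF := pvFold_eq_F (array.dropLast).reverse ((array.getLast?).getD 0) []
  simp only [List.reverse_nil, List.append_nil] at hF
  rw [hF]
  have hA := swap_down_eq_F (array.dropLast).reverse ((array.getLast?).getD 0)
  rw [List.reverse_reverse] at hA
  conv_lhs => rw [hdec]
  exact hA

def swap_down_raises : Claim_raises_swap_down := by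
  unfold Claim_raises_swap_down
  exact ⟨fun a _ hr hp => hp hr, by decide, by decide, by decide⟩
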